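-- pv_equiv track=rewrite | github.com/deccatree3/kat-outbound-hub | outputs/packing/boxes.py | select_outbox_for
-- ===== SOURCE A (Python) =====
-- from typing import Dict, List, Optional, Tuple
--
-- BOXES: List[Dict] = [
--     # name        L    W    H    size  fee   fit_에이지샷1호  fit_위오1호
--     {'name': '위오 1호',     'L': 240, 'W': 170, 'H': 180, 'size_class': '극소', 'shipping_fee': 2000, 'fit_에이지샷1호': 3,    'fit_위오1호': 1},
--     {'name': '위오 3호',     'L': 340, 'W': 260, 'H': 190, 'size_class': '소',   'shipping_fee': 2500, 'fit_에이지샷1호': 8,    'fit_위오1호': 2},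
--     {'name': '위오 5호',     'L': 420, 'W': 300, 'H': 260, 'size_class': '중',   'shipping_fee': 3050, 'fit_에이지샷1호': 17,   'fit_위오1호': 2},
--     {'name': '위오 7호',     'L': 500, 'W': 300, 'H': 160, 'size_class': '소',   'shipping_fee': 2500, 'fit_에이지샷1호': 12,   'fit_위오1호': 0},
--     {'name': '위오 9호',     'L': 490, 'W': 390, 'H': 300, 'size_class': '중',   'shipping_fee': 3050, 'fit_에이지샷1호': 23,   'fit_위오1호': 4},
--     {'name': '위오 11호',    'L': 560, 'W': 380, 'H': 300, 'size_class': '대1',  'shipping_fee': 4600, 'fit_에이지샷1호': 35,   'fit_위오1호': 6},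
--     {'name': '에이지샷 1호', 'L': 160, 'W': 110, 'H': 70,  'size_class': '극소', 'shipping_fee': 2000, 'fit_에이지샷1호': None, 'fit_위오1호': 0},
--     {'name': '에이지샷 9호', 'L': 750, 'W': 520, 'H': 420, 'size_class': '대2',  'shipping_fee': 4900, 'fit_에이지샷1호': 100,  'fit_위오1호': 18},
-- ]
--
-- def _outbox_candidates(inbox_type: str) -> List[Dict]:
--     fit_key = 'fit_에이지샷1호' if inbox_type == '에이지샷 1호' else 'fit_위오1호'
--     return sorted(
--         [b for b in BOXES if b['name'] != '에이지샷 1호' and b.get(fit_key)],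
--         key=lambda x: x['shipping_fee'],
--     )
--
-- def select_outbox_for(inbox_type: str, count: int) -> Tuple[str, int]:
--     """주어진 인박스 N개를 담을 가장 저렴한 아웃박스 (Best-Fit).
--     반환: (아웃박스명, 그 박스의 fit 한도). count > 모든 박스 fit 이면 가장 큰 fit 박스 반환.
--     """
--     fit_key = 'fit_에이지샷1호' if inbox_type == '에이지샷 1호' else 'fit_위오1호'
--     candidates = _outbox_candidates(inbox_type)
--     if not candidates:
--         return ('', 0)
--     box = next((b for b in candidates if b[fit_key] >= count), None)
--     if box is None:
--         box = max(candidates, key=lambda x: x[fit_key])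
--     return (box['name'], box[fit_key])
-- ===== SOURCE B (Python) =====
-- from typing import Tuple
--
-- BOXES = [
--     {'name': '위오 1호',     'L': 240, 'W': 170, 'H': 180, 'size_class': '극소', 'shipping_fee': 2000, 'fit_에이지샷1호': 3,    'fit_위오1호': 1},
--     {'name': '위오 3호',     'L': 340, 'W': 260, 'H': 190, 'size_class': '소',   'shipping_fee': 2500, 'fit_에이지샷1호': 8,    'fit_위오1호': 2},
--     {'name': '위오 5호',     'L': 420, 'W': 300, 'H': 260, 'size_class': '중',   'shipping_fee': 3050, 'fit_에이지샷1호': 17,   'fit_위오1호': 2},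
--     {'name': '위오 7호',     'L': 500, 'W': 300, 'H': 160, 'size_class': '소',   'shipping_fee': 2500, 'fit_에이지샷1호': 12,   'fit_위오1호': 0},
--     {'name': '위오 9호',     'L': 490, 'W': 390, 'H': 300, 'size_class': '중',   'shipping_fee': 3050, 'fit_에이지샷1호': 23,   'fit_위오1호': 4},
--     {'name': '위오 11호',    'L': 560, 'W': 380, 'H': 300, 'size_class': '대1',  'shipping_fee': 4600, 'fit_에이지샷1호': 35,   'fit_위오1호': 6},
--     {'name': '에이지샷 1호', 'L': 160, 'W': 110, 'H': 70,  'size_class': '극소', 'shipping_fee': 2000, 'fit_에이지샷1호': None, 'fit_위오1호': 0},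
--     {'name': '에이지샷 9호', 'L': 750, 'W': 520, 'H': 420, 'size_class': '대2',  'shipping_fee': 4900, 'fit_에이지샷1호': 100,  'fit_위오1호': 18},
-- ]
--
-- def select_outbox_for(inbox_type: str, count: int) -> Tuple[str, int]:
--     """One pass over BOXES in original order: cheapest box that fits; else largest fit."""
--     fit_key = 'fit_에이지샷1호' if inbox_type == '에이지샷 1호' else 'fit_위오1호'
--     best_fit = None   # cheapest among boxes with fit >= count (first seen wins on fee ties)
--     best_max = None   # largest fit overall (first seen wins on ties)
--     for b in BOXES:
--         if b['name'] == '에이지샷 1호' or not b[fit_key]: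
--             continue
--         fit = b[fit_key]
--         if fit >= count and (best_fit is None or b['shipping_fee'] < best_fit['shipping_fee']):
--             best_fit = b
--         if best_max is None or fit > best_max[fit_key]:
--             best_max = b
--     box = best_fit if best_fit is not None else best_max
--     if box is None:
--         return ('', 0)
--     return (box['name'], box[fit_key])
-- ===== Notes on version B (the rewrite author's own statement) =====
-- stated objective: simpler
-- what changed: Replaced the helper's filter-then-stable-sort plus linear search with a single pass over BOXES in original order that tracks the cheapest fitting box (first-seen wins on fee ties, matching the stable sort) and the largest-fit box for the fallback.
import Mathlib
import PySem

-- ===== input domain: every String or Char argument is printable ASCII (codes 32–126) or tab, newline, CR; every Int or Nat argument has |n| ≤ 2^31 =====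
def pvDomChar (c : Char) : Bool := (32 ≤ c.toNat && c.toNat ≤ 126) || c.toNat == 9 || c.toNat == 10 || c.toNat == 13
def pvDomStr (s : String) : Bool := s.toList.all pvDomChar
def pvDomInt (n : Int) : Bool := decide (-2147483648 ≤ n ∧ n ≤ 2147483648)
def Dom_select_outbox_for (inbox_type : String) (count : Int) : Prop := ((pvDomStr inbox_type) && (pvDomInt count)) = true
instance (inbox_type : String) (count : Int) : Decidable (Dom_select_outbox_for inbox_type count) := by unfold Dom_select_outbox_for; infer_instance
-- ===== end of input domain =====

-- B replaces A's filter + stable sort + linear search with one pass over BOXES in original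
-- order, tracking the cheapest fitting box and the largest-fit box (objective: simpler).

-- A box: only the fields the function reads (name, shipping_fee, the two fit columns).
-- fit_에이지샷1호 is Option Int because one row holds None.
structure PvBox where
  name : String
  fee : Int
  fitA : Option Int
  fitW : Int
deriving DecidableEq, Repr

def pvBOXES : List PvBox :=
  [ ⟨"위오 1호", 2000, some 3, 1⟩,
    ⟨"위오 3호", 2500, some 8, 2⟩,
    ⟨"위오 5호", 3050, some 17, 2⟩,
    ⟨"위오 7호", 2500, some 12, 0⟩,
    ⟨"위오 9호", 3050, some 23, 4⟩,
    ⟨"위오 11호", 4600, some 35, 6⟩,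
    ⟨"에이지샷 1호", 2000, none, 0⟩,
    ⟨"에이지샷 9호", 4900, some 100, 18⟩ ]

-- b[fit_key] as an Option Int (isAge = which fit column fit_key names)
def pvFit (isAge : Bool) (b : PvBox) : Option Int :=
  if isAge then b.fitA else some b.fitW

-- Python truthiness of b.get(fit_key): None and 0 are falsy
def pvTruthy (o : Option Int) : Bool :=
  match o with
  | none => false
  | some v => v != 0

-- ===== PORT A =====
-- _outbox_candidates: filter by name and truthy fit, then stable sort by shipping_fee
def pvCandidates (isAge : Bool) : List PvBox :=
  PySem.List.sorted
    (pvBOXES.filter (fun b => b.name != "에이지샷 1호" && pvTruthy (pvFit isAge b)))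
    (fun b => b.fee)

-- b[fit_key] read as an Int; the None row never reaches the comparisons below
-- (it is filtered out by name), so `.getD 0` is exact on every reachable box.
def pvFitVal (isAge : Bool) (b : PvBox) : Int := (pvFit isAge b).getD 0

def select_outbox_for (inbox_type : String) (count : Int) : String × Int :=
  let isAge := inbox_type == "에이지샷 1호"
  let candidates := pvCandidates isAge
  if candidates.isEmpty then ("", 0)
  else
    match candidates.find? (fun b => pvFitVal isAge b ≥ count) with
    | some box => (box.name, pvFitVal isAge box)
    | none =>
      match PySem.List.max? candidates (fun b => pvFitVal isAge b) with
      | some box => (box.name, pvFitVal isAge box)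
      | none => ("", 0)   -- unreachable: candidates nonempty

-- ===== PORT B =====
-- the loop body of B: skip excluded boxes, update (cheapest fitting, largest fit)
def pvStep (isAge : Bool) (count : Int) (acc : Option PvBox × Option PvBox) (b : PvBox) :
    Option PvBox × Option PvBox :=
  if b.name == "에이지샷 1호" || !pvTruthy (pvFit isAge b) then acc
  else
    let fit := pvFitVal isAge b
    let bestFit :=
      if fit ≥ count && (acc.1.elim true (fun c => b.fee < c.fee)) then some b else acc.1
    let bestMax :=
      if acc.2.elim true (fun c => fit > pvFitVal isAge c) then some b else acc.2
    (bestFit, bestMax)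

def select_outbox_for_alt (inbox_type : String) (count : Int) : String × Int :=
  let isAge := inbox_type == "에이지샷 1호"
  let (bestFit, bestMax) := pvBOXES.foldl (pvStep isAge count) (none, none)
  match bestFit.orElse (fun _ => bestMax) with
  | none => ("", 0)
  | some box => (box.name, pvFitVal isAge box)

-- ===== PRECONDITION & SPEC =====
def Spec_select_outbox_for (inbox_type : String) (count : Int) (out : String × Int) : Prop := out = select_outbox_for_alt inbox_type count
instance (inbox_type : String) (count : Int) (out : String × Int) : Decidable (Spec_select_outbox_for inbox_type count out) := by unfold Spec_select_outbox_for; infer_instance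

-- ===== CLAIM (what is proved, stated in full; the proofs are below) =====
def Claim_equal_select_outbox_for : Prop := ∀ (inbox_type : String) (count : Int), Dom_select_outbox_for inbox_type count → Spec_select_outbox_for inbox_type count (select_outbox_for inbox_type count)

-- ===== LEMMAS AND PROOFS =====

-- the candidate lists, computed once for each fit column
lemma pv_cand_false : pvCandidates false =
    [ ⟨"위오 1호", 2000, some 3, 1⟩,
      ⟨"위오 3호", 2500, some 8, 2⟩,
      ⟨"위오 5호", 3050, some 17, 2⟩,
      ⟨"위오 9호", 3050, some 23, 4⟩,
      ⟨"위오 11호", 4600, some 35, 6⟩,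
      ⟨"에이지샷 9호", 4900, some 100, 18⟩ ] := by decide

lemma pv_cand_true : pvCandidates true =
    [ ⟨"위오 1호", 2000, some 3, 1⟩,
      ⟨"위오 3호", 2500, some 8, 2⟩,
      ⟨"위오 7호", 2500, some 12, 0⟩,
      ⟨"위오 5호", 3050, some 17, 2⟩,
      ⟨"위오 9호", 3050, some 23, 4⟩,
      ⟨"위오 11호", 4600, some 35, 6⟩,
      ⟨"에이지샷 9호", 4900, some 100, 18⟩ ] := by decide

-- with the box lists fixed, both sides are piecewise constant in count:
-- split count into the regions between consecutive fit values and compute.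
lemma pv_core (isAge : Bool) (count : Int) :
    (let candidates := pvCandidates isAge
     if candidates.isEmpty then ("", 0)
     else
       match candidates.find? (fun b => pvFitVal isAge b ≥ count) with
       | some box => (box.name, pvFitVal isAge box)
       | none =>
         match PySem.List.max? candidates (fun b => pvFitVal isAge b) with
         | some box => (box.name, pvFitVal isAge box)
         | none => (("", 0) : String × Int)) =
    (let (bestFit, bestMax) := pvBOXES.foldl (pvStep isAge count) (none, none)
     match bestFit.orElse (fun _ => bestMax) with
     | none => (("", 0) : String × Int)
     | some box => (box.name, pvFitVal isAge box)) := by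
  cases isAge
  · rw [pv_cand_false]
    by_cases h : count ≤ 1
    · have e1 : ((1:Int) ≥ count) := by omega
      have e2 : ((2:Int) ≥ count) := by omega
      have e4 : ((4:Int) ≥ count) := by omega
      have e6 : ((6:Int) ≥ count) := by omega
      have e18 : ((18:Int) ≥ count) := by omega
      simp [pvBOXES, pvStep, pvFitVal, pvFit, pvTruthy, List.find?, e1, e2, e4, e6, e18]
    · by_cases h : count ≤ 2
      · have e1 : ¬((1:Int) ≥ count) := by omega
        have e2 : ((2:Int) ≥ count) := by omega
        have e4 : ((4:Int) ≥ count) := by omega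
        have e6 : ((6:Int) ≥ count) := by omega
        have e18 : ((18:Int) ≥ count) := by omega
        simp [pvBOXES, pvStep, pvFitVal, pvFit, pvTruthy, List.find?, e1, e2, e4, e6, e18]
      · by_cases h : count ≤ 4
        · have e1 : ¬((1:Int) ≥ count) := by omega
          have e2 : ¬((2:Int) ≥ count) := by omega
          have e4 : ((4:Int) ≥ count) := by omega
          have e6 : ((6:Int) ≥ count) := by omega
          have e18 : ((18:Int) ≥ count) := by omega
          simp [pvBOXES, pvStep, pvFitVal, pvFit, pvTruthy, List.find?, e1, e2, e4, e6, e18]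
        · by_cases h : count ≤ 6
          · have e1 : ¬((1:Int) ≥ count) := by omega
            have e2 : ¬((2:Int) ≥ count) := by omega
            have e4 : ¬((4:Int) ≥ count) := by omega
            have e6 : ((6:Int) ≥ count) := by omega
            have e18 : ((18:Int) ≥ count) := by omega
            simp [pvBOXES, pvStep, pvFitVal, pvFit, pvTruthy, List.find?, e1, e2, e4, e6, e18]
          · by_cases h : count ≤ 18
            · have e1 : ¬((1:Int) ≥ count) := by omega
              have e2 : ¬((2:Int) ≥ count) := by omega
              have e4 : ¬((4:Int) ≥ count) := by omega
              have e6 : ¬((6:Int) ≥ count) := by omega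
              have e18 : ((18:Int) ≥ count) := by omega
              simp [pvBOXES, pvStep, pvFitVal, pvFit, pvTruthy, List.find?, e1, e2, e4, e6, e18]
            · have e1 : ¬((1:Int) ≥ count) := by omega
              have e2 : ¬((2:Int) ≥ count) := by omega
              have e4 : ¬((4:Int) ≥ count) := by omega
              have e6 : ¬((6:Int) ≥ count) := by omega
              have e18 : ¬((18:Int) ≥ count) := by omega
              simp [pvBOXES, pvStep, pvFitVal, pvFit, pvTruthy, List.find?,
                PySem.List.max?, e1, e2, e4, e6, e18]
  · rw [pv_cand_true]
    by_cases h : count ≤ 3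
    · have e3 : ((3:Int) ≥ count) := by omega
      have e8 : ((8:Int) ≥ count) := by omega
      have e12 : ((12:Int) ≥ count) := by omega
      have e17 : ((17:Int) ≥ count) := by omega
      have e23 : ((23:Int) ≥ count) := by omega
      have e35 : ((35:Int) ≥ count) := by omega
      have e100 : ((100:Int) ≥ count) := by omega
      simp [pvBOXES, pvStep, pvFitVal, pvFit, pvTruthy, List.find?, e3, e8, e12, e17, e23, e35, e100]
    · by_cases h : count ≤ 8
      · have e3 : ¬((3:Int) ≥ count) := by omega
        have e8 : ((8:Int) ≥ count) := by omega
        have e12 : ((12:Int) ≥ count) := by omega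
        have e17 : ((17:Int) ≥ count) := by omega
        have e23 : ((23:Int) ≥ count) := by omega
        have e35 : ((35:Int) ≥ count) := by omega
        have e100 : ((100:Int) ≥ count) := by omega
        simp [pvBOXES, pvStep, pvFitVal, pvFit, pvTruthy, List.find?, e3, e8, e12, e17, e23, e35, e100]
      · by_cases h : count ≤ 12
        · have e3 : ¬((3:Int) ≥ count) := by omega
          have e8 : ¬((8:Int) ≥ count) := by omega
          have e12 : ((12:Int) ≥ count) := by omega
          have e17 : ((17:Int) ≥ count) := by omega
          have e23 : ((23:Int) ≥ count) := by omega
          have e35 : ((35:Int) ≥ count) := by omega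
          have e100 : ((100:Int) ≥ count) := by omega
          simp [pvBOXES, pvStep, pvFitVal, pvFit, pvTruthy, List.find?, e3, e8, e12, e17, e23, e35, e100]
        · by_cases h : count ≤ 17
          · have e3 : ¬((3:Int) ≥ count) := by omega
            have e8 : ¬((8:Int) ≥ count) := by omega
            have e12 : ¬((12:Int) ≥ count) := by omega
            have e17 : ((17:Int) ≥ count) := by omega
            have e23 : ((23:Int) ≥ count) := by omega
            have e35 : ((35:Int) ≥ count) := by omega
            have e100 : ((100:Int) ≥ count) := by omega
            simp [pvBOXES, pvStep, pvFitVal, pvFit, pvTruthy, List.find?, e3, e8, e12, e17, e23, e35, e100]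
          · by_cases h : count ≤ 23
            · have e3 : ¬((3:Int) ≥ count) := by omega
              have e8 : ¬((8:Int) ≥ count) := by omega
              have e12 : ¬((12:Int) ≥ count) := by omega
              have e17 : ¬((17:Int) ≥ count) := by omega
              have e23 : ((23:Int) ≥ count) := by omega
              have e35 : ((35:Int) ≥ count) := by omega
              have e100 : ((100:Int) ≥ count) := by omega
              simp [pvBOXES, pvStep, pvFitVal, pvFit, pvTruthy, List.find?, e3, e8, e12, e17, e23, e35, e100]
            · by_cases h : count ≤ 35
              · have e3 : ¬((3:Int) ≥ count) := by omega
                have e8 : ¬((8:Int) ≥ count) := by omega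
                have e12 : ¬((12:Int) ≥ count) := by omega
                have e17 : ¬((17:Int) ≥ count) := by omega
                have e23 : ¬((23:Int) ≥ count) := by omega
                have e35 : ((35:Int) ≥ count) := by omega
                have e100 : ((100:Int) ≥ count) := by omega
                simp [pvBOXES, pvStep, pvFitVal, pvFit, pvTruthy, List.find?, e3, e8, e12, e17, e23, e35, e100]
              · by_cases h : count ≤ 100
                · have e3 : ¬((3:Int) ≥ count) := by omega
                  have e8 : ¬((8:Int) ≥ count) := by omega
                  have e12 : ¬((12:Int) ≥ count) := by omega
                  have e17 : ¬((17:Int) ≥ count) := by omega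
                  have e23 : ¬((23:Int) ≥ count) := by omega
                  have e35 : ¬((35:Int) ≥ count) := by omega
                  have e100 : ((100:Int) ≥ count) := by omega
                  simp [pvBOXES, pvStep, pvFitVal, pvFit, pvTruthy, List.find?, e3, e8, e12, e17, e23, e35, e100]
                · have e3 : ¬((3:Int) ≥ count) := by omega
                  have e8 : ¬((8:Int) ≥ count) := by omega
                  have e12 : ¬((12:Int) ≥ count) := by omega
                  have e17 : ¬((17:Int) ≥ count) := by omega
                  have e23 : ¬((23:Int) ≥ count) := by omega
                  have e35 : ¬((35:Int) ≥ count) := by omega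
                  have e100 : ¬((100:Int) ≥ count) := by omega
                  simp [pvBOXES, pvStep, pvFitVal, pvFit, pvTruthy, List.find?,
                    PySem.List.max?, e3, e8, e12, e17, e23, e35, e100]

-- ===== VERDICT (by name: the statement is the Claim_ definition above) =====
theorem select_outbox_for_spec : Claim_equal_select_outbox_for := by
  intro inbox_type count _
  unfold Spec_select_outbox_for select_outbox_for select_outbox_for_alt
  exact pv_core (inbox_type == "에이지샷 1호") count
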